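-- pv_equiv track=rewrite | github.com/EUD-curso-python/funciones-y-clases-Javier2178 | funciones_y_clases.py | pares_medias
-- ===== SOURCE A (Python) =====
-- def pares_medias(socks):
--     '''Contar pares de medias
--
--     Esta función debe recibir como argumento una lista de enteros. Cada elemento
--     de esta lista representa el color de una media, y por lo tanto si hay dos
--     elementos que tienen el mismo entero, esas dos medias tienen el mismo color.
--     El objetivo de esta función es devolver un diccionario cuyas keys son cada
--     uno de los colores que se encuentren en la lista, y los valores son la
--     cantidad de pares que se han encontrado para cada color.
--
--     Las medias que no tengan pares no deberían ser incluídas en el diccionario.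
--     '''
--     pairs = dict()
--     incomplete = []
--     for color in socks:
--         if incomplete.count(color) > 0:
--             current_pairs = 0 if pairs.get(color) is None else pairs.get(color)
--             pairs.update({color : current_pairs + 1})
--             incomplete.remove(color)
--         else:
--             incomplete.append(color)
--     return pairs
-- ===== SOURCE B (Python) =====
-- def pares_medias(socks):
--     seen = {}
--     pairs = {}
--     for color in socks:
--         n = seen.get(color, 0) + 1
--         seen[color] = n
--         if n % 2 == 0:
--             pairs[color] = pairs.get(color, 0) + 1
--     return pairs
-- ===== Notes on version B (the rewrite author's own statement) =====
-- stated objective: faster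
-- what changed: Replaces the unpaired-sock list with its linear count/remove scans by a per-color running counter; a pair is recorded whenever a color's count turns even, so each sock is processed in O(1).
import Mathlib
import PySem

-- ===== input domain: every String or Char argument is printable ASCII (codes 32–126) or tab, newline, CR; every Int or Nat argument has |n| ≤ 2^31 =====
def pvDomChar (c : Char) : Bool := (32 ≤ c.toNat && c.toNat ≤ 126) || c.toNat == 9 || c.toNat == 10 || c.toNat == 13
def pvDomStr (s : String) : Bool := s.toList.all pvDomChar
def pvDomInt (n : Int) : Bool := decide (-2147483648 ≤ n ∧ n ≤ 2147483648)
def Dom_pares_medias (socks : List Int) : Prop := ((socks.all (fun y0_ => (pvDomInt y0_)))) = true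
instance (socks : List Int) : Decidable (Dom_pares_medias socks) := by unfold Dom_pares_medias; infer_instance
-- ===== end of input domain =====

-- B replaces A's unpaired-sock list (with its linear count/remove scans) by a per-color running
-- counter that records a pair whenever a color's count turns even; objective: faster.


-- ===== PORT A =====
-- loop body of A: state = (pairs, incomplete)
def pmStepA (st : PySem.Dict Int Int × List Int) (color : Int) : PySem.Dict Int Int × List Int :=
  if PySem.List.count st.2 color > 0 then
    let current_pairs : Int := match st.1.get? color with | none => 0 | some v => v
    (st.1.insert color (current_pairs + 1), (PySem.List.remove? st.2 color).getD st.2)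
  else
    (st.1, st.2 ++ [color])

def pares_medias (socks : List Int) : List (Int × Int) :=
  (socks.foldl pmStepA (PySem.Dict.empty, [])).1.items

-- ===== PORT B =====
-- loop body of B: state = (seen, pairs)
def pmStepB (st : PySem.Dict Int Int × PySem.Dict Int Int) (color : Int) : PySem.Dict Int Int × PySem.Dict Int Int :=
  let n := st.1.getD color 0 + 1
  let seen' := st.1.insert color n
  if PySem.Int.mod n 2 = 0 then (seen', st.2.insert color (st.2.getD color 0 + 1))
  else (seen', st.2)

def pares_medias_alt (socks : List Int) : List (Int × Int) :=
  (socks.foldl pmStepB (PySem.Dict.empty, PySem.Dict.empty)).2.items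

-- ===== PRECONDITION & SPEC =====
def Spec_pares_medias (socks : List Int) (out : List (Int × Int)) : Prop := out = pares_medias_alt socks
instance (socks : List Int) (out : List (Int × Int)) : Decidable (Spec_pares_medias socks out) := by unfold Spec_pares_medias; infer_instance

-- ===== CLAIM (what is proved, stated in full; the proofs are below) =====
def Claim_equal_pares_medias : Prop := ∀ (socks : List Int), Dom_pares_medias socks → Spec_pares_medias socks (pares_medias socks)

-- ===== LEMMAS AND PROOFS =====

-- invariant: the multiplicity of each color in A's `incomplete` list is the parity of B's counter
def pmInv (incomplete : List Int) (seen : PySem.Dict Int Int) : Prop :=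
  ∀ c : Int, 0 ≤ seen.getD c 0 ∧ (incomplete.count c : Int) = (seen.getD c 0) % 2

lemma pm_loop_eq : ∀ (socks : List Int) (pairs seen : PySem.Dict Int Int) (incomplete : List Int),
    pmInv incomplete seen →
    (socks.foldl pmStepA (pairs, incomplete)).1 = (socks.foldl pmStepB (seen, pairs)).2 := by
  intro socks
  induction socks with
  | nil => intro pairs seen incomplete _; rfl
  | cons x xs ih =>
    intro pairs seen incomplete hInv
    obtain ⟨hnn, hcnt⟩ := hInv x
    simp only [List.foldl_cons]
    have hmod : PySem.Int.mod (seen.getD x 0 + 1) 2 = (seen.getD x 0 + 1) % 2 :=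
      PySem.Int.mod_eq_emod_of_pos (by omega)
    by_cases h : PySem.List.count incomplete x > 0
    · -- pair completed in both programs
      have hmem : x ∈ incomplete := by
        rw [PySem.List.count_eq] at h; exact List.count_pos_iff.mp h
      have hB : (seen.getD x 0 + 1) % 2 = 0 := by
        rw [PySem.List.count_eq] at h
        have h1 : (incomplete.count x : Int) % 2 = (incomplete.count x : Int) ∨
            (1 : Int) ≤ (incomplete.count x : Int) := by omega
        omega
      have hcur : (match pairs.get? x with | none => 0 | some v => v) = pairs.getD x 0 := by
        simp [PySem.Dict.getD]; cases pairs.get? x <;> simp [Option.getD]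
      rw [show pmStepA (pairs, incomplete) x
            = (pairs.insert x (pairs.getD x 0 + 1), incomplete.erase x) by
          simp only [pmStepA, h, if_pos]
          rw [PySem.List.remove?_eq_some_erase _ _ hmem, hcur]
          rfl]
      rw [show pmStepB (seen, pairs) x
            = (seen.insert x (seen.getD x 0 + 1), pairs.insert x (pairs.getD x 0 + 1)) by
          simp only [pmStepB, hmod, hB, if_pos]]
      apply ih
      intro c
      by_cases hcx : c = x
      · subst hcx
        have he : (incomplete.erase c).count c = incomplete.count c - 1 := List.count_erase_self
        have hpos : 0 < incomplete.count c := by rw [PySem.List.count_eq] at h; exact h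
        constructor
        · rw [PySem.Dict.getD_insert_self _ _ _]; omega
        · rw [PySem.Dict.getD_insert_self, he]; push_cast [Nat.cast_sub hpos]; omega
      · have he : (incomplete.erase x).count c = incomplete.count c := List.count_erase_of_ne hcx
        obtain ⟨h1, h2⟩ := hInv c
        rw [PySem.Dict.getD_insert_of_ne _ _ _ hcx, he]
        exact ⟨h1, h2⟩
    · -- sock stays unpaired in A; count turns odd in B
      have hB : ¬ (seen.getD x 0 + 1) % 2 = 0 := by
        rw [PySem.List.count_eq] at h
        omega
      rw [show pmStepA (pairs, incomplete) x = (pairs, incomplete ++ [x]) by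
          simp only [pmStepA, h, if_neg, not_false_iff]]
      rw [show pmStepB (seen, pairs) x = (seen.insert x (seen.getD x 0 + 1), pairs) by
          simp only [pmStepB, hmod, hB, if_neg, not_false_iff]]
      apply ih
      intro c
      by_cases hcx : c = x
      · subst hcx
        constructor
        · rw [PySem.Dict.getD_insert_self _ _ _]; omega
        · rw [PySem.Dict.getD_insert_self _ _ _]
          simp [List.count_append]
          omega
      · obtain ⟨h1, h2⟩ := hInv c
        rw [PySem.Dict.getD_insert_of_ne _ _ _ hcx]
        refine ⟨h1, ?_⟩
        have hz : List.count c [x] = 0 := by simp [List.count_eq_zero, hcx]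
        simp only [List.count_append, hz, Nat.add_zero]
        exact_mod_cast h2

-- ===== VERDICT (by name: the statement is the Claim_ definition above) =====
theorem pares_medias_spec : Claim_equal_pares_medias := by
  intro socks _
  show pares_medias socks = pares_medias_alt socks
  unfold pares_medias pares_medias_alt
  rw [pm_loop_eq socks PySem.Dict.empty PySem.Dict.empty []
    (by intro c; constructor <;> simp [PySem.Dict.getD, PySem.Dict.get?, PySem.Dict.empty])]
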